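-- pv_equiv track=rewrite | github.com/yahwang/yahwang-algorithm | BinarySearch/PGS_43237.py | solution
-- ===== SOURCE A (Python) =====
-- def solution(budgets, M):
--     answer = 0
--     start = 1
--     end = max(budgets)
--
--     if sum(budgets) < M:
--         return end
--
--     while start <= end:
--         mid = (start + end) // 2
--         total = 0
--         for budget in budgets:
--             if budget >= mid:
--                 total += mid
--             else:
--                 total += budget
--         if total == M:
--             return mid
--         elif total > M:
--             end = mid - 1
--         else:
--             answer = mid
--             start = mid + 1
--     return answer
-- ===== SOURCE B (Python) =====
-- def solution(budgets, M):
--     mx = max(budgets)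
--     if sum(budgets) < M:
--         return mx
--     pref = 0
--     s = sorted(budgets)
--     n = len(s)
--     for i, b in enumerate(s):
--         k = n - i
--         if pref + b * k > M:
--             return max((M - pref) // k, 0)
--         pref += b
--     return max(mx, 0)
-- ===== Notes on version B (the rewrite author's own statement) =====
-- stated objective: faster
-- what changed: replaced the binary search over cap values (recomputing the capped sum for every probe) by sort + one prefix-sum scan that solves the cutoff cap with a single floor division
-- outside the precondition, e.g. on solution([], 5): A raises ValueError, B raises ValueError
import Mathlib
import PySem

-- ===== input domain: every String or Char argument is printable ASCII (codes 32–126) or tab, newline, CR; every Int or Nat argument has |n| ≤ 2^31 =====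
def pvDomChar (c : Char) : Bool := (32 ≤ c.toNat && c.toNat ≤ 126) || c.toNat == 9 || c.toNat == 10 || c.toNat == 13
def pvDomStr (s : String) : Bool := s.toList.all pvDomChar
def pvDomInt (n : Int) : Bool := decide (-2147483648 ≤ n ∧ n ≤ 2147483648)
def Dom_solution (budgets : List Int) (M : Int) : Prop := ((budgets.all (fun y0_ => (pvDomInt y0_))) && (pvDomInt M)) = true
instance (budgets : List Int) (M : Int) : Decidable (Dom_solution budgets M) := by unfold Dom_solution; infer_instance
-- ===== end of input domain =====

-- B replaces A's value-range binary search (recomputing the capped sum per probe) by sort + one prefix-sum scan solving the cutoff with a floor division.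


-- ===== PORT A =====
-- inner for-loop of A: total = Σ (mid if budget ≥ mid else budget)
def pvTotalA (budgets : List Int) (mid : Int) : Int :=
  budgets.foldl (fun t b => if b ≥ mid then t + mid else t + b) 0

-- the while-loop of A (state: answer, start, e)
def pvLoopA (budgets : List Int) (M answer start e : Int) : Int :=
  if h : start ≤ e then
    let mid := PySem.Int.floordiv (start + e) 2
    let total := pvTotalA budgets mid
    if total = M then mid
    else if total > M then pvLoopA budgets M answer start (mid - 1)
    else pvLoopA budgets M mid (mid + 1) e
  else answer
termination_by (e + 1 - start).toNat
decreasing_by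
  · have := PySem.Int.floordiv_two_mid_bounds h; omega
  · have := PySem.Int.floordiv_two_mid_bounds h; omega

def solution (budgets : List Int) (M : Int) : Int :=
  match PySem.List.max? budgets (fun x => x) with
  | none => 0      -- Python max([]) raises ValueError; excluded by Pre_solution
  | some e => if budgets.sum < M then e else pvLoopA budgets M 0 1 e

-- ===== PORT B =====
-- the for-loop of Source B over the sorted list; k = n - i is the length of the remaining suffix
def pvScanB (M mx : Int) : List Int → Int → Int
  | [], _ => max mx 0
  | b :: rest, pref =>
    let k : Int := (b :: rest).length
    if pref + b * k > M then max (PySem.Int.floordiv (M - pref) k) 0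
    else pvScanB M mx rest (pref + b)

def solution_alt (budgets : List Int) (M : Int) : Int :=
  match PySem.List.max? budgets (fun x => x) with
  | none => 0      -- Python max([]) raises ValueError; excluded by Pre_solution
  | some mx =>
    if budgets.sum < M then mx
    else pvScanB M mx (PySem.List.sorted budgets (fun x => x) false) 0

-- ===== PRECONDITION & SPEC =====
-- Pre_ excludes only the empty list, on which Python's max(budgets) raises ValueError in both A and B.
def Pre_solution (budgets : List Int) (M : Int) : Prop := budgets ≠ []
instance (budgets : List Int) (M : Int) : Decidable (Pre_solution budgets M) := by unfold Pre_solution; infer_instance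
def pvWitness_solution : List Int × Int := ([1, 2, 3], 4)

def Spec_solution (budgets : List Int) (M : Int) (out : Int) : Prop := out = solution_alt budgets M
instance (budgets : List Int) (M : Int) (out : Int) : Decidable (Spec_solution budgets M out) := by unfold Spec_solution; infer_instance

-- ===== CLAIM (what is proved, stated in full; the proofs are below) =====
def Claim_equal_solution : Prop := ∀ (budgets : List Int) (M : Int), Dom_solution budgets M → Pre_solution budgets M → Spec_solution budgets M (solution budgets M)

-- ===== LEMMAS AND PROOFS =====

-- f l c = Σ min(b, c): the capped sum both programs reason about
def pvF (l : List Int) (c : Int) : Int := (l.map (fun b => min b c)).sum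

-- the shared characterisation: v is the largest cap in [1, mx] whose capped sum is ≤ M, or 0 if none
def pvP (l : List Int) (mx M v : Int) : Prop :=
  (v = 0 ∨ (1 ≤ v ∧ v ≤ mx ∧ pvF l v ≤ M)) ∧ ∀ c, v < c → c ≤ mx → M < pvF l c

theorem pvF_cons (b : Int) (l : List Int) (c : Int) : pvF (b :: l) c = min b c + pvF l c := by
  simp [pvF]

theorem pvF_append (l₁ l₂ : List Int) (c : Int) : pvF (l₁ ++ l₂) c = pvF l₁ c + pvF l₂ c := by
  simp [pvF]

theorem pvF_perm {l l' : List Int} (h : l.Perm l') (c : Int) : pvF l c = pvF l' c :=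
  (h.map _).sum_eq

theorem pvF_mono (l : List Int) {c c' : Int} (h : c ≤ c') : pvF l c ≤ pvF l c' := by
  induction l with
  | nil => simp [pvF]
  | cons b t ih =>
    rw [pvF_cons, pvF_cons]
    have hm : min b c ≤ min b c' := by omega
    omega

theorem pvF_strict (l : List Int) {x a c : Int} (hx : x ∈ l) (hac : a < c) (hcx : c ≤ x) :
    pvF l a < pvF l c := by
  induction l with
  | nil => simp at hx
  | cons b t ih =>
    rw [pvF_cons, pvF_cons]
    rcases List.mem_cons.mp hx with heq | hx
    · have h1 : min b a = a := by omega
      have h2 : min b c = c := by omega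
      have := pvF_mono t (le_of_lt hac); omega
    · have := ih hx
      have hm : min b a ≤ min b c := by omega
      omega

theorem pvF_of_all_le (l : List Int) {c : Int} (h : ∀ x ∈ l, x ≤ c) : pvF l c = l.sum := by
  induction l with
  | nil => rfl
  | cons b t ih =>
    rw [pvF_cons, ih (fun x hx => h x (List.mem_cons_of_mem _ hx)), List.sum_cons]
    have := h b List.mem_cons_self; omega

theorem pvF_of_all_ge (l : List Int) {c : Int} (h : ∀ x ∈ l, c ≤ x) : pvF l c = c * l.length := by
  induction l with
  | nil => simp [pvF]
  | cons b t ih =>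
    rw [pvF_cons, ih (fun x hx => h x (List.mem_cons_of_mem _ hx))]
    have hb := h b List.mem_cons_self
    have hm : min b c = c := by omega
    rw [hm]
    push_cast [List.length_cons]
    ring

theorem pvP_unique {l : List Int} {mx M v₁ v₂ : Int} (h₁ : pvP l mx M v₁) (h₂ : pvP l mx M v₂) :
    v₁ = v₂ := by
  obtain ⟨a₁, b₁⟩ := h₁
  obtain ⟨a₂, b₂⟩ := h₂
  by_contra hne
  rcases lt_or_gt_of_ne hne with h | h
  · rcases a₂ with rfl | ⟨h1, h2, h3⟩
    · omega
    · exact absurd h3 (not_le.mpr (b₁ _ h h2))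
  · rcases a₁ with rfl | ⟨h1, h2, h3⟩
    · omega
    · exact absurd h3 (not_le.mpr (b₂ _ h h2))

theorem pvP_perm {l l' : List Int} (h : l.Perm l') {mx M v : Int} (hp : pvP l mx M v) :
    pvP l' mx M v := by
  obtain ⟨a, b⟩ := hp
  constructor
  · rcases a with rfl | ⟨h1, h2, h3⟩
    · exact Or.inl rfl
    · exact Or.inr ⟨h1, h2, by rw [← pvF_perm h]; exact h3⟩
  · intro c hc hcmx; rw [← pvF_perm h]; exact b c hc hcmx

theorem pvTotalA_eq_aux (l : List Int) (mid a : Int) :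
    l.foldl (fun t b => if b ≥ mid then t + mid else t + b) a = a + pvF l mid := by
  induction l generalizing a with
  | nil => simp [pvF]
  | cons b t ih =>
    rw [List.foldl_cons, ih, pvF_cons]
    have hm : (if b ≥ mid then a + mid else a + b) = a + min b mid := by
      split_ifs <;> omega
    rw [hm]; ring

theorem pvTotalA_eq (l : List Int) (mid : Int) : pvTotalA l mid = pvF l mid := by
  simpa using pvTotalA_eq_aux l mid 0

theorem pvLoopA_sat (budgets : List Int) (M mx : Int) (hmem : mx ∈ budgets) :
    ∀ (n : Nat) (answer start e : Int), (e + 1 - start).toNat = n → 1 ≤ start → answer = start - 1 → e ≤ mx →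
      (answer = 0 ∨ (1 ≤ answer ∧ answer ≤ mx ∧ pvF budgets answer ≤ M)) →
      (∀ c, e < c → c ≤ mx → M < pvF budgets c) →
      pvP budgets mx M (pvLoopA budgets M answer start e) := by
  intro n
  induction n using Nat.strong_induction_on with
  | _ n ih =>
    intro answer start e hn h1 h2 h3 h4 h5
    rw [pvLoopA]
    by_cases h : start ≤ e
    · have hb := PySem.Int.floordiv_two_mid_bounds h
      simp only [dif_pos h]
      set mid := PySem.Int.floordiv (start + e) 2 with hmid
      have hfm : pvTotalA budgets mid = pvF budgets mid := pvTotalA_eq _ _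
      by_cases heq : pvTotalA budgets mid = M
      · rw [if_pos heq]
        constructor
        · right; exact ⟨by omega, by omega, by omega⟩
        · intro c hc hcmx
          have := pvF_strict budgets hmem hc hcmx
          omega
      · rw [if_neg heq]
        by_cases hgt : pvTotalA budgets mid > M
        · rw [if_pos hgt]
          apply ih (e + 1 - start - (e + 1 - mid)).toNat (by omega) answer start (mid - 1) (by omega) h1 h2 (by omega) h4
          intro c hc hcmx
          have := pvF_mono budgets (show mid ≤ c by omega)
          omega
        · rw [if_neg hgt]
          apply ih (e + 1 - start - (mid + 1 - start)).toNat (by omega) mid (mid + 1) e (by omega) (by omega) (by omega) h3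
          · right; exact ⟨by omega, by omega, by omega⟩
          · exact h5
    · simp only [dif_neg h]
      exact ⟨h4, fun c hc hcmx => h5 c (by omega) hcmx⟩

theorem pvScanB_sat (s : List Int) (mx M : Int)
    (hs : s.Pairwise (· ≤ ·)) (hmx : ∀ x ∈ s, x ≤ mx) (hMs : M ≤ s.sum) (hne : s ≠ []) :
    ∀ l done B, s = done ++ l → (∀ d ∈ done, d ≤ B) →
      (done = [] ∨ done.sum + B * l.length ≤ M) →
      pvP s mx M (pvScanB M mx l done.sum) := by
  intro l
  induction l with
  | nil =>
    intro done B hsplit hdB hBM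
    have hds : done = s := by simpa using hsplit.symm
    subst hds
    rcases hBM with rfl | hle
    · exact absurd rfl hne
    · have hsum : done.sum = M := by simp at hle; omega
      simp only [pvScanB]
      constructor
      · by_cases hmx1 : 1 ≤ mx
        · right
          refine ⟨by omega, by omega, ?_⟩
          have : max mx 0 = mx := by omega
          rw [this, pvF_of_all_le done hmx]; omega
        · left; omega
      · intro c hc hcmx; omega
  | cons b rest ih =>
    intro done B hsplit hdB hBM
    have hpair := List.pairwise_append.mp (hsplit ▸ hs)
    have hdb : ∀ d ∈ done, d ≤ b := fun d hd => hpair.2.2 d hd b List.mem_cons_self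
    have hbr : ∀ x ∈ rest, b ≤ x := by
      have := List.pairwise_cons.mp hpair.2.1
      exact this.1
    have hbmx : b ≤ mx := hmx b (by rw [hsplit]; exact List.mem_append_right _ List.mem_cons_self)
    have hk : (0:Int) < ((b :: rest).length : Int) := by
      push_cast [List.length_cons]; omega
    have hlen : ((b :: rest).length : Int) = (rest.length : Int) + 1 := by
      push_cast [List.length_cons]; ring
    -- formula: for caps between the consumed prefix and b, the capped sum is pref + c·k
    have hform : ∀ c, (∀ d ∈ done, d ≤ c) → c ≤ b →
        pvF s c = done.sum + c * ((b :: rest).length : Int) := by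
      intro c hdc hcb
      rw [hsplit, pvF_append, pvF_of_all_le done hdc, pvF_of_all_ge]
      intro x hx
      rcases List.mem_cons.mp hx with rfl | hx
      · exact hcb
      · exact le_trans hcb (hbr x hx)
    simp only [pvScanB]
    by_cases htest : done.sum + b * ((b :: rest).length : Int) > M
    · rw [if_pos htest]
      set k : Int := ((b :: rest).length : Int) with hkdef
      set q : Int := PySem.Int.floordiv (M - done.sum) k with hqdef
      have hq1 : q * k ≤ M - done.sum := (PySem.Int.le_floordiv_iff_mul_le hk).mp (le_refl q)
      have hq2 : M - done.sum < (q + 1) * k := by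
        have : q < q + 1 := by omega
        exact (PySem.Int.floordiv_lt_iff_lt_mul hk).mp this
      have hbq : q < b := by
        have hqb : q * k < b * k := by omega
        exact lt_of_mul_lt_mul_right hqb (le_of_lt hk)
      have hdq : ∀ d ∈ done, d ≤ q := by
        rcases hBM with rfl | hle
        · intro d hd; simp at hd
        · intro d hd
          have hBq : B ≤ q := by
            apply (PySem.Int.le_floordiv_iff_mul_le hk).mpr
            rw [hlen] at hle ⊢
            have hr : B * ((rest.length : Int) + 1) ≤ M - done.sum := by omega
            exact hr
          exact le_trans (hdB d hd) hBq
      constructor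
      · by_cases hq0 : 1 ≤ q
        · right
          have hmq : max q 0 = q := by omega
          rw [hmq]
          refine ⟨hq0, by omega, ?_⟩
          rw [hform q hdq (le_of_lt hbq)]
          omega
        · left; omega
      · intro c hc hcmx
        have hcq : q < c := by omega
        by_cases hcb : c ≤ b
        · rw [hform c (fun d hd => by have := hdq d hd; omega) hcb]
          have : (q + 1) * k ≤ c * k := mul_le_mul_of_nonneg_right (by omega) (le_of_lt hk)
          omega
        · have hfb : pvF s b = done.sum + b * k := hform b hdb (le_refl b)
          have := pvF_mono s (show b ≤ c by omega)
          omega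
    · rw [if_neg htest]
      have hres : done.sum + b = (done ++ [b]).sum := by simp
      rw [hres]
      apply ih (done ++ [b]) b
      · rw [hsplit]; simp
      · intro d hd
        rcases List.mem_append.mp hd with hd | hd
        · exact hdb d hd
        · simp at hd; omega
      · right
        have hsb : (done ++ [b]).sum = done.sum + b := by simp
        rw [hsb]
        rw [hlen] at htest
        have : done.sum + b * ((rest.length : Int) + 1) ≤ M := by omega
        have hx : b * ((rest.length : Int) + 1) = b * (rest.length : Int) + b := by ring
        omega

-- ===== VERDICT (by name: the statement is the Claim_ definition above) =====
theorem solution_spec : Claim_equal_solution := by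
  intro budgets M _ hPre
  unfold Spec_solution solution solution_alt
  cases hmax : PySem.List.max? budgets (fun x => x) with
  | none => exact absurd ((PySem.List.max?_eq_none_iff budgets (fun x => x)).mp hmax) hPre
  | some mx =>
    by_cases hlt : budgets.sum < M
    · simp [hlt]
    · simp only [if_neg hlt]
      have hmem : mx ∈ budgets := PySem.List.max?_mem hmax
      have hisMax : ∀ y ∈ budgets, y ≤ mx := by
        have := PySem.List.max?_isMax hmax
        simpa using this
      have hA : pvP budgets mx M (pvLoopA budgets M 0 1 mx) := by
        apply pvLoopA_sat budgets M mx hmem (mx + 1 - 1).toNat 0 1 mx rfl (by omega) (by omega) (le_refl mx) (Or.inl rfl)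
        intro c hc hcmx; omega
      set s := PySem.List.sorted budgets (fun x => x) false with hsdef
      have hperm : s.Perm budgets := PySem.List.sorted_perm budgets (fun x => x) false
      have hpair : s.Pairwise (· ≤ ·) := by
        have := PySem.List.sorted_pairwise (xs := budgets) (key := fun x => x)
        simpa using this
      have hmxs : ∀ x ∈ s, x ≤ mx := fun x hx => hisMax x (hperm.mem_iff.mp hx)
      have hMs : M ≤ s.sum := by rw [hperm.sum_eq]; omega
      have hsne : s ≠ [] := by
        intro hnil
        exact hPre (List.perm_nil.mp (hnil ▸ hperm).symm)
      have hB : pvP s mx M (pvScanB M mx s 0) := by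
        have := pvScanB_sat s mx M hpair hmxs hMs hsne s [] 0 rfl (by simp) (Or.inl rfl)
        simpa using this
      exact pvP_unique hA (pvP_perm hperm hB)
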